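-- pv_equiv track=rewrite | github.com/RamanujanMachine/ramanujantools | ramanujantools/solvers/euler_pcf.py | multi_subsets
-- ===== SOURCE A (Python) =====
-- def multi_subsets(elem_to_count: dict):
--     """
--     A generator returning all the decompositions of a multiset to two multisets.
--     elem_to_count needs to be a dictionary from the distinct elements in the multisets to the number of times
--     they appear there.
--
--     For example, the multiset {{x, x, x, y, y, z}}, should be represented by the dictionary {x:3, y:2, z:1}
--     """
--
--     def _multi_subsets(inner_elem_to_count: dict, keys, current1, current2):
--         if len(keys) == 0:
--             yield current1, current2
--             return
--
--         key = keys[0]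
--         total = inner_elem_to_count[key]
--         for amount in range(total + 1):
--             yield from _multi_subsets(
--                 inner_elem_to_count,
--                 keys[1:],
--                 {**current1, key: amount},
--                 {**current2, key: total - amount},
--             )
--
--     yield from _multi_subsets(elem_to_count, list(elem_to_count.keys()), {}, {})
-- ===== SOURCE B (Python) =====
-- def multi_subsets(elem_to_count: dict):
--     """
--     A generator returning all the decompositions of a multiset to two multisets.
--
--     Iterative level-by-level construction: start from the single empty decomposition
--     and, for each element, extend every partial decomposition with each possible split
--     of that element's count.
--     """
--     pairs = [({}, {})]
--     for key, total in elem_to_count.items():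
--         pairs = [
--             ({**c1, key: amount}, {**c2, key: total - amount})
--             for c1, c2 in pairs
--             for amount in range(total + 1)
--         ]
--     yield from pairs
-- ===== Notes on version B (the rewrite author's own statement) =====
-- stated objective: alternative
-- what changed: Replaces A's recursive generator (descend key by key, copying the two partial dicts along each branch) with an iterative breadth-first fold: keep the list of all partial decompositions and extend it once per key with every possible split of that key's count.
import Mathlib
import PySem

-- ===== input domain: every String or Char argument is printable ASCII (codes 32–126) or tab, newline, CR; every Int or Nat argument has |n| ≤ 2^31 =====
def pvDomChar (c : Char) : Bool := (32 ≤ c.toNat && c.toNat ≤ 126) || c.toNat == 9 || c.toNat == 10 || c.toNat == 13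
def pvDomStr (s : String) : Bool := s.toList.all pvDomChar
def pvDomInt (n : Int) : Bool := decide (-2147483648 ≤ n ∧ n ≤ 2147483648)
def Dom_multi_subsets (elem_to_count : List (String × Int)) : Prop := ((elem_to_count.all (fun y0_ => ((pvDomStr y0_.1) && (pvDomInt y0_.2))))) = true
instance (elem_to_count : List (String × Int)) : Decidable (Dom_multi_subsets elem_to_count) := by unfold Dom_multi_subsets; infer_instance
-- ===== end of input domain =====

-- B replaces A's recursive descent with an iterative breadth-first fold over the keys (alternative decomposition, same cost).

-- ===== PORT A =====
-- inner generator _multi_subsets: structural recursion on the remaining keys list;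
-- 'yield from' over range(total+1) becomes flatMap over pyRange.
def multiSubsetsAux (d : PySem.Dict String Int) (keys : List String)
    (c1 c2 : PySem.Dict String Int) :
    List ((List (String × Int)) × (List (String × Int))) :=
  match keys with
  | [] => [(c1.items, c2.items)]
  | key :: rest =>
    match d.get? key with
    | none => []  -- Python would raise KeyError; unreachable since keys come from d
    | some total =>
      (PySem.List.pyRange 0 (total + 1) 1).flatMap (fun amount =>
        multiSubsetsAux d rest (c1.insert key amount) (c2.insert key (total - amount)))

def multi_subsets (elem_to_count : List (String × Int)) :
    List ((List (String × Int)) × (List (String × Int))) :=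
  -- the Python argument is a dict: d = ofList of the association list
  multiSubsetsAux (PySem.Dict.ofList elem_to_count) (PySem.Dict.ofList elem_to_count).keys
    PySem.Dict.empty PySem.Dict.empty

-- ===== PORT B =====
def multiSubsetsStep (pairs : List (PySem.Dict String Int × PySem.Dict String Int))
    (kt : String × Int) : List (PySem.Dict String Int × PySem.Dict String Int) :=
  pairs.flatMap (fun p =>
    (PySem.List.pyRange 0 (kt.2 + 1) 1).map (fun amount =>
      (p.1.insert kt.1 amount, p.2.insert kt.1 (kt.2 - amount))))

def multi_subsets_alt (elem_to_count : List (String × Int)) :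
    List ((List (String × Int)) × (List (String × Int))) :=
  -- the Python argument is a dict: iterate ofList(...).items
  (((PySem.Dict.ofList elem_to_count).items.foldl multiSubsetsStep
      [(PySem.Dict.empty, PySem.Dict.empty)]).map (fun p => (p.1.items, p.2.items)))

-- ===== PRECONDITION & SPEC =====
def Spec_multi_subsets (elem_to_count : List (String × Int)) (out : List ((List (String × Int)) × (List (String × Int)))) : Prop := out = multi_subsets_alt elem_to_count
instance (elem_to_count : List (String × Int)) (out : List ((List (String × Int)) × (List (String × Int)))) : Decidable (Spec_multi_subsets elem_to_count out) := by unfold Spec_multi_subsets; infer_instance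

-- ===== CLAIM (what is proved, stated in full; the proofs are below) =====
def Claim_equal_multi_subsets : Prop := ∀ (elem_to_count : List (String × Int)), Dom_multi_subsets elem_to_count → Spec_multi_subsets elem_to_count (multi_subsets elem_to_count)

-- ===== LEMMAS AND PROOFS =====

theorem foldl_step_nil (rest : List (String × Int)) :
    rest.foldl multiSubsetsStep [] = [] := by
  induction rest with
  | nil => rfl
  | cons x xs ih => simpa [multiSubsetsStep] using ih

theorem foldl_step_append (rest : List (String × Int))
    (P Q : List (PySem.Dict String Int × PySem.Dict String Int)) :
    rest.foldl multiSubsetsStep (P ++ Q)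
      = rest.foldl multiSubsetsStep P ++ rest.foldl multiSubsetsStep Q := by
  induction rest generalizing P Q with
  | nil => rfl
  | cons x xs ih =>
    simp only [List.foldl_cons]
    rw [show multiSubsetsStep (P ++ Q) x
        = multiSubsetsStep P x ++ multiSubsetsStep Q x from List.flatMap_append ..]
    exact ih _ _

theorem foldl_step_flatMap (rest : List (String × Int))
    (P : List (PySem.Dict String Int × PySem.Dict String Int)) :
    rest.foldl multiSubsetsStep P
      = P.flatMap (fun q => rest.foldl multiSubsetsStep [q]) := by
  induction P with
  | nil => simpa using foldl_step_nil rest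
  | cons q P ih =>
    have : q :: P = [q] ++ P := rfl
    rw [this, foldl_step_append, ih]
    simp

theorem aux_eq_foldl (d : PySem.Dict String Int) (l : List (String × Int))
    (c1 c2 : PySem.Dict String Int)
    (h : ∀ p ∈ l, d.get? p.1 = some p.2) :
    multiSubsetsAux d (l.map Prod.fst) c1 c2
      = (l.foldl multiSubsetsStep [(c1, c2)]).map (fun p => (p.1.items, p.2.items)) := by
  induction l generalizing c1 c2 with
  | nil => rfl
  | cons kv rest ih =>
    obtain ⟨k, v⟩ := kv
    have hk : d.get? k = some v := h (k, v) (List.mem_cons_self ..)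
    have hrest : ∀ p ∈ rest, d.get? p.1 = some p.2 :=
      fun p hp => h p (List.mem_cons_of_mem _ hp)
    simp only [List.map_cons, multiSubsetsAux, hk, List.foldl_cons]
    rw [show multiSubsetsStep [(c1, c2)] (k, v)
        = (PySem.List.pyRange 0 (v + 1) 1).map (fun a =>
            (c1.insert k a, c2.insert k (v - a))) by
          simp [multiSubsetsStep]]
    rw [foldl_step_flatMap, List.flatMap_map, List.map_flatMap]
    exact List.flatMap_congr (fun a _ => ih _ _ hrest)

-- ===== VERDICT (by name: the statement is the Claim_ definition above) =====
theorem multi_subsets_spec : Claim_equal_multi_subsets := by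
  intro e _
  unfold Spec_multi_subsets multi_subsets multi_subsets_alt
  have hnd := PySem.Dict.nodup_keys_ofList (κ := String) (ν := Int) e
  have h : ∀ p ∈ (PySem.Dict.ofList e).items,
      (PySem.Dict.ofList e).get? p.1 = some p.2 := by
    intro p hp
    obtain ⟨k, v⟩ := p
    exact PySem.Dict.get?_of_mem_items _ hp hnd
  have hkeys : (PySem.Dict.ofList e).keys = (PySem.Dict.ofList e).items.map Prod.fst := rfl
  rw [hkeys]
  exact aux_eq_foldl _ _ _ _ h
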